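-- pv_equiv track=rewrite | github.com/sandy-embedded-systems/02-Python | 06_strings/01_worksheet/16_30.py | consecutive_frequency
-- ===== SOURCE A (Python) =====
-- def consecutive_frequency(s):
--     if not s:
--         return {}
--     result={}
--     count=1
--     for i in range(1,len(s)):
--         if s[i]==s[i-1]:
--             count+=1
--         else:
--             result[s[i-1]]=count
--             count=1
--     result[s[-1]]=count
--     return result
-- ===== SOURCE B (Python) =====
-- def consecutive_frequency(s):
--     result = {}
--     rest = s
--     while rest:
--         c = rest[0]
--         k = 1
--         while k < len(rest) and rest[k] == c:
--             k += 1
--         result[c] = k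
--         rest = rest[k:]
--     return result
-- ===== Notes on version B (the rewrite author's own statement) =====
-- stated objective: alternative
-- what changed: B consumes the string run by run (find each maximal run's length, record it, slice it off) instead of A's index loop over adjacent pairs with a boundary-flag counter and a trailing fix-up insert.
import Mathlib
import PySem

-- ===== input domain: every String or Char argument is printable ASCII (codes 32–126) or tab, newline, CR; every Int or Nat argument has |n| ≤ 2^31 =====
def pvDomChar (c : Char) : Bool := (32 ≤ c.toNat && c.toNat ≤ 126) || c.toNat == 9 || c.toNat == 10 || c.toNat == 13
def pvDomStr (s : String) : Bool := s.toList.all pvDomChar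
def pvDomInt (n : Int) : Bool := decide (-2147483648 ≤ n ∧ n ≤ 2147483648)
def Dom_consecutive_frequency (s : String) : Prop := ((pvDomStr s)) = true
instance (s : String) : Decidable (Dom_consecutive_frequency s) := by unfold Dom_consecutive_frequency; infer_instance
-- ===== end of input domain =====

-- B consumes the string run by run instead of A's index loop with a boundary counter (alternative decomposition; same behaviour).

-- ===== PORT A =====
-- loop body of A's 'for i in range(1, len(s))' (state: (result, count))
def pvStepA (cs : List Char) (st : PySem.Dict String Int × Int) (i : Int) : PySem.Dict String Int × Int :=
  if PySem.List.pyGetD cs i 'a' = PySem.List.pyGetD cs (i - 1) 'a' then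
    (st.1, st.2 + 1)
  else
    (st.1.insert (String.ofList [PySem.List.pyGetD cs (i - 1) 'a']) st.2, 1)

def consecutive_frequency (s : String) : List (String × Int) :=
  let cs := s.toList
  if cs = [] then []
  else
    let st := (PySem.List.pyRange 1 (cs.length : Int) 1).foldl (pvStepA cs) (PySem.Dict.empty, 1)
    (st.1.insert (String.ofList [PySem.List.pyGetD cs (-1) 'a']) st.2).items

-- ===== PORT B =====
-- inner 'while k < len(rest) and rest[k] == c' of B, counting the matching tail chars
def pvRunLen (c : Char) : List Char → Nat
  | [] => 0
  | x :: t => if x = c then pvRunLen c t + 1 else 0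

-- outer 'while rest' of B: record the run of the head char, slice it off
def pvAltGo : List Char → PySem.Dict String Int → PySem.Dict String Int
  | [], d => d
  | c :: t, d =>
      pvAltGo (t.drop (pvRunLen c t)) (d.insert (String.ofList [c]) (1 + (pvRunLen c t : Int)))
termination_by l _ => l.length
decreasing_by simp only [List.length_drop, List.length_cons]; omega

def consecutive_frequency_alt (s : String) : List (String × Int) :=
  (pvAltGo s.toList PySem.Dict.empty).items

-- ===== PRECONDITION & SPEC =====
def Spec_consecutive_frequency (s : String) (out : List (String × Int)) : Prop := out = consecutive_frequency_alt s
instance (s : String) (out : List (String × Int)) : Decidable (Spec_consecutive_frequency s out) := by unfold Spec_consecutive_frequency; infer_instance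

-- ===== CLAIM (what is proved, stated in full; the proofs are below) =====
def Claim_equal_consecutive_frequency : Prop := ∀ (s : String), Dom_consecutive_frequency s → Spec_consecutive_frequency s (consecutive_frequency s)

-- ===== LEMMAS AND PROOFS =====

-- proof-side restatement of A's fold as a structural recursion carrying the previous char
def pvLoop : List Char → Char → Int → PySem.Dict String Int → PySem.Dict String Int × Int
  | [], _, k, d => (d, k)
  | x :: t, c, k, d =>
      if x = c then pvLoop t x (k + 1) d else pvLoop t x 1 (d.insert (String.ofList [c]) k)

theorem pv_fold_eq : ∀ (t pre : List Char) (c : Char) (d : PySem.Dict String Int) (k : Int),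
    (PySem.List.pyRange ((pre.length : Int) + 1) ((pre.length : Int) + 1 + (t.length : Int)) 1).foldl
        (pvStepA (pre ++ c :: t)) (d, k) = pvLoop t c k d := by
  intro t
  induction t with
  | nil =>
      intro pre c d k
      rw [PySem.List.pyRange_one_eq_nil (by simp)]
      simp [pvLoop]
  | cons x t ih =>
      intro pre c d k
      rw [PySem.List.pyRange_one_cons (by push_cast [List.length_cons]; omega)]
      rw [List.foldl_cons]
      have hget1 : PySem.List.pyGetD (pre ++ c :: x :: t) ((pre.length : Int) + 1) 'a' = x := by
        rw [show ((pre.length : Int) + 1) = ((pre.length + 1 : Nat) : Int) by push_cast; ring]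
        rw [PySem.List.pyGetD_natCast]
        simp [List.getD]
      have hget0 : PySem.List.pyGetD (pre ++ c :: x :: t) ((pre.length : Int) + 1 - 1) 'a' = c := by
        rw [show ((pre.length : Int) + 1 - 1) = ((pre.length : Nat) : Int) by ring]
        rw [PySem.List.pyGetD_natCast]
        simp [List.getD]
      have hsplit : pre ++ c :: x :: t = (pre ++ [c]) ++ x :: t := by simp
      have hrange : PySem.List.pyRange ((pre.length : Int) + 1 + 1) ((pre.length : Int) + 1 + ((x :: t).length : Int)) 1
          = PySem.List.pyRange (((pre ++ [c]).length : Int) + 1) (((pre ++ [c]).length : Int) + 1 + (t.length : Int)) 1 := by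
        congr 1 <;> push_cast [List.length_append, List.length_cons, List.length_nil] <;> ring
      rw [pvStepA, hget1, hget0]
      by_cases h : x = c
      · rw [if_pos h, hrange, hsplit]
        rw [ih (pre ++ [c]) x d (k + 1)]
        simp [pvLoop, h]
      · rw [if_neg h, hrange, hsplit]
        rw [ih (pre ++ [c]) x (d.insert (String.ofList [c]) k) 1]
        simp [pvLoop, h]

theorem pv_altGo_eq : ∀ (t : List Char) (c : Char) (k : Int) (d : PySem.Dict String Int),
    (pvLoop t c k d).1.insert (String.ofList [(c :: t).getLast (by simp)]) (pvLoop t c k d).2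
      = pvAltGo (t.drop (pvRunLen c t)) (d.insert (String.ofList [c]) (k + (pvRunLen c t : Int))) := by
  intro t
  induction t with
  | nil =>
      intro c k d
      simp [pvLoop, pvRunLen, pvAltGo]
  | cons x t ih =>
      intro c k d
      by_cases h : x = c
      · subst h
        simp only [pvLoop, pvRunLen, List.getLast_cons_cons, if_true]
        rw [ih x (k + 1) d]
        rw [show ((x :: t).drop (pvRunLen x t + 1)) = t.drop (pvRunLen x t) from rfl]
        have h2 : (k + ((pvRunLen x t + 1 : Nat) : Int)) = k + 1 + (pvRunLen x t : Int) := by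
          push_cast
          ring
        rw [h2]
      · simp only [pvLoop, if_neg h, List.getLast_cons_cons]
        rw [ih x 1 (d.insert (String.ofList [c]) k)]
        have hr : pvRunLen c (x :: t) = 0 := by simp [pvRunLen, h]
        rw [hr]
        simp [pvAltGo]

-- ===== VERDICT (by name: the statement is the Claim_ definition above) =====
theorem consecutive_frequency_spec : Claim_equal_consecutive_frequency := by
  intro s _
  unfold Spec_consecutive_frequency consecutive_frequency consecutive_frequency_alt
  cases hcs : s.toList with
  | nil => simp [pvAltGo, PySem.Dict.empty]
  | cons c t =>
      rw [if_neg (by simp : ¬ (c :: t = []))]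
      have hrange : PySem.List.pyRange 1 (((c :: t).length : Int)) 1
          = PySem.List.pyRange ((([] : List Char).length : Int) + 1) ((([] : List Char).length : Int) + 1 + (t.length : Int)) 1 := by
        congr 1 <;> push_cast [List.length_cons, List.length_nil] <;> ring
      have hlast : PySem.List.pyGetD (c :: t) (-1) 'a' = (c :: t).getLast (by simp) :=
        PySem.List.pyGetD_neg_one (c :: t) 'a' (by simp)
      rw [hrange, hlast]
      have hfold := pv_fold_eq t [] c PySem.Dict.empty 1
      simp only [List.nil_append] at hfold
      rw [hfold]
      show ((pvLoop t c 1 PySem.Dict.empty).1.insert (String.ofList [(c :: t).getLast (by simp)])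
              (pvLoop t c 1 PySem.Dict.empty).2).items
          = (pvAltGo (c :: t) PySem.Dict.empty).items
      rw [pv_altGo_eq t c 1 PySem.Dict.empty]
      conv_rhs => rw [pvAltGo]
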